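-- pv_equiv track=rewrite | github.com/neoCheck/advent_of_code | 2015/03/day_03_2.py | get_location_set
-- ===== SOURCE A (Python) =====
-- def get_location_set(instruction: list[str]) -> set[tuple[int, int]]:
--     location_set: set[tuple[int, int]] = set()
--     i, j = 0, 0
--     location_set.add((i, j))
--
--     for c in instruction:
--         if c == ">":
--             j += 1
--         elif c == "<":
--             j -= 1
--         elif c == "v":
--             i += 1
--         elif c == "^":
--             i -= 1
--         location_set.add((i, j))
--
--     return location_set
-- ===== SOURCE B (Python) =====
-- from itertools import accumulate
--
--
-- def get_location_set(instruction: list[str]) -> set[tuple[int, int]]: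
--     # Solve each axis as an independent 1-D prefix-sum problem, then zip.
--     rows = accumulate(((c == "v") - (c == "^") for c in instruction), initial=0)
--     cols = accumulate(((c == ">") - (c == "<") for c in instruction), initial=0)
--     return set(zip(rows, cols))
-- ===== Notes on version B (the rewrite author's own statement) =====
-- stated objective: alternative
-- what changed: Instead of A's single mutating loop over a 2-D point, B decomposes the walk into two independent 1-D problems: boolean-comparison arithmetic turns each character into a row delta and a column delta, two separate prefix-sum scans produce the row and column coordinate sequences, and zipping them yields the visited positions collected into a set.
import Mathlib
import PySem

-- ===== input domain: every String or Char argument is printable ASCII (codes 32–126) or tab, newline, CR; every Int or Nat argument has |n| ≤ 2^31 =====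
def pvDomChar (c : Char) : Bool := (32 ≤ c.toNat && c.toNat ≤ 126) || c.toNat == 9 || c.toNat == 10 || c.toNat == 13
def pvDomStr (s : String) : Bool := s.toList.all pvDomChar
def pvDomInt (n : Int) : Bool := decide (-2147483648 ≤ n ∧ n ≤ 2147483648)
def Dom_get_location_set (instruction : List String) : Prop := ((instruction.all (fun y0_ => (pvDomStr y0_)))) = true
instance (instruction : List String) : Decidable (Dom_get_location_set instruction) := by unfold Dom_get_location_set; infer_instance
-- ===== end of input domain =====

-- B splits A's 2-D walk into two independent 1-D prefix-sum problems (row and column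
-- coordinates computed separately from boolean-comparison deltas) and zips them: a
-- different decomposition of the same O(n) task.

-- ===== PORT A =====
-- state: ((i, j), location_set)
def pvStepA (st : (Int × Int) × PySem.Set (Int × Int)) (c : String) :
    (Int × Int) × PySem.Set (Int × Int) :=
  let i := st.1.1
  let j := st.1.2
  let ij :=
    if c = ">" then (i, j + 1)
    else if c = "<" then (i, j - 1)
    else if c = "v" then (i + 1, j)
    else if c = "^" then (i - 1, j)
    else (i, j)
  (ij, PySem.Set.add st.2 ij)

def get_location_set (instruction : List String) : List (Int × Int) :=
  (instruction.foldl pvStepA (((0 : Int), (0 : Int)),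
    PySem.Set.add PySem.Set.empty ((0 : Int), (0 : Int)))).2

-- ===== PORT B =====
-- (c == "v") - (c == "^")  and  (c == ">") - (c == "<") as Int arithmetic on booleans
def pvDi (c : String) : Int := (if c = "v" then 1 else 0) - (if c = "^" then 1 else 0)
def pvDj (c : String) : Int := (if c = ">" then 1 else 0) - (if c = "<" then 1 else 0)

def get_location_set_alt (instruction : List String) : List (Int × Int) :=
  let rows := List.scanl (· + ·) (0 : Int) (instruction.map pvDi)
  let cols := List.scanl (· + ·) (0 : Int) (instruction.map pvDj)
  PySem.Set.ofList (rows.zip cols)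

-- ===== PRECONDITION & SPEC =====
def Spec_get_location_set (instruction : List String) (out : List (Int × Int)) : Prop := out = get_location_set_alt instruction
instance (instruction : List String) (out : List (Int × Int)) : Decidable (Spec_get_location_set instruction out) := by unfold Spec_get_location_set; infer_instance

-- ===== CLAIM (what is proved, stated in full; the proofs are below) =====
def Claim_equal_get_location_set : Prop := ∀ (instruction : List String), Dom_get_location_set instruction → Spec_get_location_set instruction (get_location_set instruction)

-- ===== LEMMAS AND PROOFS =====

def pvAdd (p d : Int × Int) : Int × Int := (p.1 + d.1, p.2 + d.2)

-- A's new position is the old one shifted by the per-axis deltas.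
lemma pvStep_pos (p : Int × Int) (s : PySem.Set (Int × Int)) (c : String) :
    pvStepA (p, s) c = (pvAdd p (pvDi c, pvDj c), PySem.Set.add s (pvAdd p (pvDi c, pvDj c))) := by
  simp only [pvStepA, pvAdd, pvDi, pvDj]
  split_ifs with h1 h2 h3 h4 <;> subst_vars <;> simp_all [sub_eq_add_neg]

-- A's loop from position p (already inserted into s) adds exactly the prefix sums.
lemma pv_loop_eq (l : List String) (p : Int × Int) (s : PySem.Set (Int × Int)) :
    (l.foldl pvStepA (p, PySem.Set.add s p)).2 =
      (List.scanl pvAdd p (l.map (fun c => (pvDi c, pvDj c)))).foldl PySem.Set.add s := by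
  induction l generalizing p s with
  | nil => simp
  | cons c rest ih =>
      simp only [List.foldl_cons, List.map_cons, List.scanl_cons, pvStep_pos]
      exact ih (pvAdd p (pvDi c, pvDj c)) (PySem.Set.add s p)

-- zipping two coordinate-wise scans is the scan of the pairwise addition
lemma pv_zip_scanl (l : List String) (a b : Int) :
    (List.scanl (· + ·) a (l.map pvDi)).zip (List.scanl (· + ·) b (l.map pvDj)) =
      List.scanl pvAdd (a, b) (l.map (fun c => (pvDi c, pvDj c))) := by
  induction l generalizing a b with
  | nil => simp
  | cons c rest ih =>
      simp only [List.map_cons, List.scanl_cons, List.zip_cons_cons]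
      exact congrArg _ (ih (a + pvDi c) (b + pvDj c))

-- ===== VERDICT (by name: the statement is the Claim_ definition above) =====
theorem get_location_set_spec : Claim_equal_get_location_set := by
  intro instruction _
  show get_location_set instruction = get_location_set_alt instruction
  unfold get_location_set get_location_set_alt
  rw [PySem.Set.ofList_eq_foldl, pv_zip_scanl]
  exact pv_loop_eq instruction (0, 0) PySem.Set.empty
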